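-- pv_equiv track=rewrite | github.com/Taciturno11/API_Digitalizacion | procesador_imagen_v9.py | normalizar_texto_espaciado
-- ===== SOURCE A (Python) =====
-- def normalizar_texto_espaciado(texto):
--     """
--     Corrige texto con letras individuales separadas por espacios.
--     Ejemplo: "GAMB O A" -> "GAMBOA", "S A C" -> "SAC"
--     """
--     if not texto:
--         return texto
--
--     palabras = texto.split()
--     if not palabras:
--         return texto
--
--     grupos = []
--     i = 0
--     while i < len(palabras):
--         palabra = palabras[i]
--
--         if len(palabra) == 1 and palabra.isalpha():
--             letras = [palabra]
--             j = i + 1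
--             while j < len(palabras) and len(palabras[j]) == 1 and palabras[j].isalpha():
--                 letras.append(palabras[j])
--                 j += 1
--             grupos.append(('letras', ''.join(letras)))
--             i = j
--         else:
--             grupos.append(('palabra', palabra))
--             i += 1
--
--     resultado = []
--     i = 0
--     while i < len(grupos):
--         tipo, valor = grupos[i]
--
--         if tipo == 'palabra':
--             if i + 1 < len(grupos) and grupos[i + 1][0] == 'letras':
--                 siguiente_letras = grupos[i + 1][1]
--                 if len(siguiente_letras) <= 2:
--                     resultado.append(valor + siguiente_letras)
--                     i += 2
--                     continue
--             resultado.append(valor)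
--         else:
--             resultado.append(valor)
--         i += 1
--
--     return ' '.join(resultado)
-- ===== SOURCE B (Python) =====
-- def normalizar_texto_espaciado(texto):
--     """
--     Corrige texto con letras individuales separadas por espacios.
--     Una pasada: buffer de letras sueltas consecutivas, volcado al cambiar de token.
--     """
--     if not texto:
--         return texto
--
--     palabras = texto.split()
--     if not palabras:
--         return texto
--
--     resultado = []
--     run = []
--
--     def volcar():
--         if run:
--             s = ''.join(run)
--             if len(s) <= 2 and resultado:
--                 resultado[-1] += s
--             else:
--                 resultado.append(s)
--             run.clear()
--
--     for palabra in palabras: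
--         if len(palabra) == 1 and palabra.isalpha():
--             run.append(palabra)
--         else:
--             volcar()
--             resultado.append(palabra)
--     volcar()
--
--     return ' '.join(resultado)
-- ===== Notes on version B (the rewrite author's own statement) =====
-- stated objective: simpler
-- what changed: Replaces A's two-phase pipeline (an index-driven while-loop building tagged ('letras'/'palabra') groups, then a second lookahead while-loop merging them) with a single pass over the split words carrying a run buffer of consecutive single letters that is flushed (glued to the previous word when short, else emitted) at each ordinary word and at the end.
import Mathlib
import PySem

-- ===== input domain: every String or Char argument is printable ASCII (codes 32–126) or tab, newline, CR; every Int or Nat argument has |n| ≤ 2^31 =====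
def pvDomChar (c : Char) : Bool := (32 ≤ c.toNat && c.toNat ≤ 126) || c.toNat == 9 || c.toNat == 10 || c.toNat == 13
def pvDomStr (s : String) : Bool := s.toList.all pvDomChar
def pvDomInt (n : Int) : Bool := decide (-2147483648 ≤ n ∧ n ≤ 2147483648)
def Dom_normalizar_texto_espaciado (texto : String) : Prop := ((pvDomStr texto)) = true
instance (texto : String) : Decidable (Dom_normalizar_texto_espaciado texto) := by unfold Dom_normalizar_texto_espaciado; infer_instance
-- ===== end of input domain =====

-- B replaces A's two-phase pipeline (index-driven grouping pass, then a lookahead merging pass)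
-- by a single fold over the words with a run buffer; objective: simpler, same asymptotic cost.

-- ===== PORT A =====
-- len(palabra) == 1 and palabra.isalpha()
def pvSingleAlpha (w : List Char) : Bool := w.length == 1 && PySem.Chars.strIsalpha w

-- A's first while-loop: the inner 'while j' scan is the takeWhile/dropWhile split of the tail
def pvGrupos : List (List Char) → List (String × List Char)
  | [] => []
  | p :: rest =>
    if pvSingleAlpha p then
      ("letras", PySem.Chars.join [] (p :: rest.takeWhile pvSingleAlpha))
        :: pvGrupos (rest.dropWhile pvSingleAlpha)
    else
      ("palabra", p) :: pvGrupos rest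
  termination_by ws => ws.length
  decreasing_by
    · simpa [Nat.lt_succ_iff] using List.length_dropWhile_le pvSingleAlpha rest
    · simp

-- A's second while-loop with its i+1 lookahead
def pvMergeA : List (String × List Char) → List (List Char)
  | [] => []
  | (tipo, valor) :: rest =>
    if tipo == "palabra" then
      match rest with
      | (t2, v2) :: rest2 =>
        if t2 == "letras" && decide (v2.length ≤ 2) then
          (valor ++ v2) :: pvMergeA rest2
        else
          valor :: pvMergeA ((t2, v2) :: rest2)
      | [] => valor :: pvMergeA ([] : List (String × List Char))
    else
      valor :: pvMergeA rest

def normalizar_texto_espaciado (texto : String) : String :=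
  if texto = "" then texto
  else
    let palabras := (PySem.Str.split₀ texto).map String.toList
    if palabras = [] then texto
    else String.ofList (PySem.Chars.join [' '] (pvMergeA (pvGrupos palabras)))

-- ===== PORT B =====
-- volcar(): flush the run buffer; resultado and run are kept reversed (Python appends at the end)
def pvFlush (resultado run : List (List Char)) : List (List Char) :=
  if run = [] then resultado
  else
    let s := PySem.Chars.join [] run.reverse
    match resultado with
    | r :: rs => if s.length ≤ 2 then (r ++ s) :: rs else s :: r :: rs
    | [] => [s]

-- the body of B's single for-loop
def pvStep (st : List (List Char) × List (List Char)) (palabra : List Char) :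
    List (List Char) × List (List Char) :=
  if pvSingleAlpha palabra then (st.1, palabra :: st.2)
  else (palabra :: pvFlush st.1 st.2, [])

def normalizar_texto_espaciado_alt (texto : String) : String :=
  if texto = "" then texto
  else
    let palabras := (PySem.Str.split₀ texto).map String.toList
    if palabras = [] then texto
    else
      let st := palabras.foldl pvStep ([], [])
      String.ofList (PySem.Chars.join [' '] (pvFlush st.1 st.2).reverse)

-- ===== PRECONDITION & SPEC =====
def Spec_normalizar_texto_espaciado (texto : String) (out : String) : Prop := out = normalizar_texto_espaciado_alt texto
instance (texto : String) (out : String) : Decidable (Spec_normalizar_texto_espaciado texto out) := by unfold Spec_normalizar_texto_espaciado; infer_instance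

-- ===== CLAIM (what is proved, stated in full; the proofs are below) =====
def Claim_equal_normalizar_texto_espaciado : Prop := ∀ (texto : String), Dom_normalizar_texto_espaciado texto → Spec_normalizar_texto_espaciado texto (normalizar_texto_espaciado texto)

-- ===== LEMMAS AND PROOFS =====

-- Common reformulation of both merge phases: process groups left to right carrying the
-- pending previous word (the one a short 'letras' group may still be glued onto).
def pvMergeFrom : Option (List Char) → List (String × List Char) → List (List Char)
  | prev, [] => prev.toList
  | prev, (tipo, valor) :: rest =>
    if tipo == "palabra" then prev.toList ++ pvMergeFrom (some valor) rest
    else if tipo == "letras" then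
      (match prev with
       | some w => if valor.length ≤ 2 then [w ++ valor] else [w, valor]
       | none => [valor]) ++ pvMergeFrom none rest
    else prev.toList ++ valor :: pvMergeFrom none rest

lemma pvMergeA_cons_other (t : String) (v : List Char) (gs : List (String × List Char))
    (ht : (t == "palabra") = false) :
    pvMergeA ((t, v) :: gs) = v :: pvMergeA gs := by
  rw [pvMergeA.eq_def]; simp [ht]

lemma pvMergeA_eq_mergeFrom (gs : List (String × List Char)) :
    pvMergeA gs = pvMergeFrom none gs ∧
    ∀ w, pvMergeA (("palabra", w) :: gs) = pvMergeFrom (some w) gs := by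
  induction gs with
  | nil => simp [pvMergeA, pvMergeFrom]
  | cons g gs ih =>
    obtain ⟨t, v⟩ := g
    refine ⟨?_, ?_⟩
    · by_cases hp : t = "palabra"
      · subst hp
        simpa [pvMergeFrom] using ih.2 v
      · rw [pvMergeA_cons_other t v gs (by simp [hp])]
        by_cases hl : t = "letras"
        · subst hl
          simp [pvMergeFrom, ih.1]
        · simp [pvMergeFrom, hp, hl, ih.1]
    · intro w
      by_cases hp : t = "palabra"
      · subst hp
        simpa [pvMergeA, pvMergeFrom] using ih.2 v
      · by_cases hl : t = "letras"
        · subst hl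
          by_cases h2 : v.length ≤ 2
          · simp [pvMergeA, pvMergeFrom, h2, ih.1]
          · rw [pvMergeA.eq_def]
            simp only [pvMergeA_cons_other "letras" v gs (by simp)]
            simp [pvMergeFrom, h2, ih.1]
        · rw [pvMergeA.eq_def]
          simp only [pvMergeA_cons_other t v gs (by simp [hp])]
          simp [pvMergeFrom, hp, hl, ih.1]

-- a fold over single-letter tokens only grows the run buffer
lemma pvFoldl_run (ts : List (List Char)) (st : List (List Char) × List (List Char))
    (h : ∀ t ∈ ts, pvSingleAlpha t = true) :
    ts.foldl pvStep st = (st.1, ts.reverse ++ st.2) := by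
  induction ts generalizing st with
  | nil => simp
  | cons t ts ih =>
    have ht := h t (by simp)
    rw [List.foldl_cons, ih _ (fun x hx => h x (by simp [hx]))]
    simp [pvStep, ht]

-- B's whole computation from state (out, []) expressed through pvMergeFrom
lemma pvMain (n : Nat) :
    ∀ ws out, ws.length ≤ n →
      (pvFlush (ws.foldl pvStep (out, ([] : List (List Char)))).1
               (ws.foldl pvStep (out, [])).2).reverse
        = out.tail.reverse ++ pvMergeFrom out.head? (pvGrupos ws) := by
  induction n with
  | zero =>
    intro ws out hlen
    have : ws = [] := List.length_eq_zero_iff.mp (Nat.le_zero.mp hlen)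
    subst this
    cases out <;> simp [pvFlush, pvGrupos, pvMergeFrom]
  | succ n ih =>
    intro ws out hlen
    cases ws with
    | nil => cases out <;> simp [pvFlush, pvGrupos, pvMergeFrom]
    | cons p rest =>
      by_cases hp : pvSingleAlpha p = true
      · -- a run starts at p
        set tk := rest.takeWhile pvSingleAlpha with htk
        set dr := rest.dropWhile pvSingleAlpha with hdr
        have hsplit : rest = tk ++ dr := (List.takeWhile_append_dropWhile).symm
        have htkall : ∀ t ∈ tk, pvSingleAlpha t = true := fun t ht =>
          List.mem_takeWhile_imp ht
        have hfold : (p :: rest).foldl pvStep (out, []) =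
            dr.foldl pvStep (out, tk.reverse ++ [p]) := by
          rw [List.foldl_cons]
          have : pvStep (out, []) p = (out, [p]) := by simp [pvStep, hp]
          rw [this, hsplit, List.foldl_append, pvFoldl_run tk (out, [p]) htkall]
        have hgr : pvGrupos (p :: rest) =
            ("letras", PySem.Chars.join [] (p :: tk)) :: pvGrupos dr := by
          rw [pvGrupos]; simp [hp, htk, hdr]
        set s := PySem.Chars.join [] (p :: tk) with hs
        have hjoin : PySem.Chars.join [] (tk.reverse ++ [p]).reverse = s := by
          simp [hs]
        cases hdrc : dr with
        | nil =>
          rw [hfold, hdrc]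
          simp only [List.foldl_nil]
          have hne : tk.reverse ++ [p] ≠ [] := by simp
          rw [pvFlush, if_neg hne, hjoin]
          rw [hgr, hdrc]
          cases out with
          | nil => simp [pvMergeFrom, pvGrupos]
          | cons o os =>
            by_cases h2 : s.length ≤ 2 <;>
              simp [pvMergeFrom, pvGrupos, h2]
        | cons q rest2 =>
          have hq : pvSingleAlpha q = false := by
            have := List.head?_dropWhile_not pvSingleAlpha rest
            rw [← hdr, hdrc] at this
            simpa using this
          rw [hfold, hdrc, List.foldl_cons]
          have hstep : pvStep (out, tk.reverse ++ [p]) q =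
              (q :: pvFlush out (tk.reverse ++ [p]), []) := by
            simp [pvStep, hq]
          rw [hstep]
          have hlen2 : rest2.length ≤ n := by
            have h1 : rest.length = tk.length + dr.length := by
              rw [hsplit, List.length_append]
            rw [hdrc] at h1
            simp only [List.length_cons] at hlen h1
            omega
          rw [ih rest2 (q :: pvFlush out (tk.reverse ++ [p])) hlen2]
          have hgr2 : pvGrupos dr = ("palabra", q) :: pvGrupos rest2 := by
            rw [hdrc, pvGrupos]; simp [hq]
          rw [hgr, hdrc] at *
          rw [hgr2]
          have hne : tk.reverse ++ [p] ≠ [] := by simp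
          rw [pvFlush, if_neg hne, hjoin]
          cases out with
          | nil => simp [pvMergeFrom]
          | cons o os =>
            by_cases h2 : s.length ≤ 2 <;>
              simp [pvMergeFrom, h2]
      · -- p is an ordinary word
        have hfold : (p :: rest).foldl pvStep (out, []) =
            rest.foldl pvStep (p :: out, []) := by
          rw [List.foldl_cons]
          have hb : pvFlush out [] = out := by simp [pvFlush]
          simp [pvStep, hp, hb]
        rw [hfold, ih rest (p :: out) (by simp only [List.length_cons] at hlen; omega)]
        have hgr : pvGrupos (p :: rest) = ("palabra", p) :: pvGrupos rest := by
          rw [pvGrupos]; simp [hp]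
        rw [hgr]
        cases out <;> simp [pvMergeFrom]

-- ===== VERDICT (by name: the statement is the Claim_ definition above) =====
theorem normalizar_texto_espaciado_spec : Claim_equal_normalizar_texto_espaciado := by
  intro texto _
  unfold Spec_normalizar_texto_espaciado normalizar_texto_espaciado normalizar_texto_espaciado_alt
  by_cases h0 : texto = ""
  · simp [h0]
  · simp only [h0, if_false]
    set palabras := (PySem.Str.split₀ texto).map String.toList with hpal
    by_cases h1 : palabras = []
    · simp [h1]
    · simp only [h1, if_false]
      have hmain := pvMain palabras.length palabras [] (le_refl _)
      simp only [List.tail_nil, List.reverse_nil, List.head?_nil, List.nil_append] at hmain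
      rw [hmain, (pvMergeA_eq_mergeFrom (pvGrupos palabras)).1]
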